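-- pv_equiv track=rewrite | github.com/739881964/xiangyu | work_dir/get_test_result.py | recol_word
-- ===== SOURCE A (Python) =====
-- def recol_word(list1, list2, list3):
--     dic_word = {}
--     for i in range(len(list1)):
--         for j in range(0, len(list2)-1, 3):
--             if list1[i] == list2[j]:
--                 dic_word.setdefault(list1[i], []).append(list2[j+1])
--         for m in range(len(list3)):
--             if list3[m] == list1[i]:
--                 dic_word.setdefault(list1[i], []).append('nagetive')
--     return dic_word
-- ===== SOURCE B (Python) =====
-- def recol_word(list1, list2, list3):
--     # Precompute: values keyed by word from list2's stride-3 scan, and a count of each word in list3.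
--     m2 = {}
--     for j in range(0, len(list2) - 1, 3):
--         m2.setdefault(list2[j], []).append(list2[j + 1])
--     c3 = {}
--     for w in list3:
--         c3[w] = c3.get(w, 0) + 1
--     dic_word = {}
--     for x in list1:
--         add = m2.get(x, []) + ['nagetive'] * c3.get(x, 0)
--         if add:
--             dic_word.setdefault(x, []).extend(add)
--     return dic_word
-- ===== Notes on version B (the rewrite author's own statement) =====
-- stated objective: faster
-- what changed: Instead of rescanning list2 (stride-3) and all of list3 for every element of list1, B precomputes a value dict from list2 and a count dict from list3 once and then makes a single pass over list1.
import Mathlib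
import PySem

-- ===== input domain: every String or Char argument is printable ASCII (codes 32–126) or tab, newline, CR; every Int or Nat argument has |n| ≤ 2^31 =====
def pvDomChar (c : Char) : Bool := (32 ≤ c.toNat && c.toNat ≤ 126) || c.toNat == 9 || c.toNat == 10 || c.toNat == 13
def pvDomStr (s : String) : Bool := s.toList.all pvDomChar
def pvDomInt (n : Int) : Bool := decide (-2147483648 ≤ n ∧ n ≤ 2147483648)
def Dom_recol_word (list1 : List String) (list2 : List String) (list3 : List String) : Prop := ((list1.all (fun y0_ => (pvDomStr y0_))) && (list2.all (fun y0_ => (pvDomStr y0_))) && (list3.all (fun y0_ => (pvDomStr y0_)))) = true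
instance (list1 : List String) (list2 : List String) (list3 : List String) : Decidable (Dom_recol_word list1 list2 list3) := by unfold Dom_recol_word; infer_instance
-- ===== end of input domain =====

-- B precomputes a value-dict from list2's stride-3 scan and a count-dict from list3,
-- then makes one pass over list1 (objective: faster, O(n1*(n2+n3)) → O(n1+n2+n3)).


-- ===== PORT A =====
-- body of A's outer loop for x = list1[i]: the stride-3 scan of list2, then the scan of list3
def pvStepA (list2 : List String) (list3 : List String)
    (dic : PySem.Dict String (List String)) (x : String) : PySem.Dict String (List String) :=
  let dic2 := (PySem.List.pyRange 0 ((list2.length : Int) - 1) 3).foldl (fun dic j =>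
    if x == PySem.List.pyGetD list2 j "" then
      dic.insert x (dic.getD x [] ++ [PySem.List.pyGetD list2 (j + 1) ""])
    else dic) dic
  (PySem.List.pyRange 0 (list3.length : Int) 1).foldl (fun dic m =>
    if PySem.List.pyGetD list3 m "" == x then
      dic.insert x (dic.getD x [] ++ ["nagetive"])
    else dic) dic2

def recol_word (list1 : List String) (list2 : List String) (list3 : List String) : List (String × List String) :=
  ((PySem.List.pyRange 0 (list1.length : Int) 1).foldl
    (fun dic i => pvStepA list2 list3 dic (PySem.List.pyGetD list1 i ""))
    PySem.Dict.empty).items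

-- ===== PORT B =====
-- m2 = {list2[j]: [list2[j+1], …]} over the stride-3 scan
def pvM2 (list2 : List String) : PySem.Dict String (List String) :=
  (PySem.List.pyRange 0 ((list2.length : Int) - 1) 3).foldl (fun d j =>
    d.insert (PySem.List.pyGetD list2 j "")
      ((d.getD (PySem.List.pyGetD list2 j "") []) ++ [PySem.List.pyGetD list2 (j + 1) ""]))
    PySem.Dict.empty

-- c3 = occurrence counts of list3
def pvC3 (list3 : List String) : PySem.Dict String Int :=
  list3.foldl (fun d w => d.insert w (d.getD w 0 + 1)) PySem.Dict.empty

def pvStepB (m2 : PySem.Dict String (List String)) (c3 : PySem.Dict String Int)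
    (d : PySem.Dict String (List String)) (x : String) : PySem.Dict String (List String) :=
  let add := m2.getD x [] ++ List.replicate (c3.getD x 0).toNat "nagetive"
  if add = [] then d else d.insert x (d.getD x [] ++ add)

def recol_word_alt (list1 : List String) (list2 : List String) (list3 : List String) : List (String × List String) :=
  (list1.foldl (pvStepB (pvM2 list2) (pvC3 list3)) PySem.Dict.empty).items

-- ===== PRECONDITION & SPEC =====
def Spec_recol_word (list1 : List String) (list2 : List String) (list3 : List String) (out : List (String × List String)) : Prop := out = recol_word_alt list1 list2 list3
instance (list1 : List String) (list2 : List String) (list3 : List String) (out : List (String × List String)) : Decidable (Spec_recol_word list1 list2 list3 out) := by unfold Spec_recol_word; infer_instance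

-- ===== CLAIM (what is proved, stated in full; the proofs are below) =====
def Claim_equal_recol_word : Prop := ∀ (list1 : List String) (list2 : List String) (list3 : List String), Dom_recol_word list1 list2 list3 → Spec_recol_word list1 list2 list3 (recol_word list1 list2 list3)

-- ===== LEMMAS AND PROOFS =====

-- appending values one by one at key x is one combined append (and a no-op for no values)
lemma fold_insert_append (x : String) (vs : List String) (d : PySem.Dict String (List String)) :
    vs.foldl (fun d v => d.insert x (d.getD x [] ++ [v])) d
      = if vs = [] then d else d.insert x (d.getD x [] ++ vs) := by
  induction vs generalizing d with
  | nil => rfl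
  | cons v vs ih =>
    simp only [List.foldl_cons, ih, PySem.Dict.getD_insert_self, PySem.Dict.insert_insert_self,
      List.append_assoc, List.singleton_append, reduceCtorEq, if_false]
    split
    · next h => subst h; simp
    · rfl

-- A's guarded stride-3 scan is the append-loop over the filtered matched values
lemma scanA2_eq (list2 : List String) (x : String) (js : List Int)
    (d : PySem.Dict String (List String)) :
    js.foldl (fun dic j => if x == PySem.List.pyGetD list2 j "" then
        dic.insert x (dic.getD x [] ++ [PySem.List.pyGetD list2 (j + 1) ""]) else dic) d
      = ((js.filter (fun j => PySem.List.pyGetD list2 j "" == x)).map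
          (fun j => PySem.List.pyGetD list2 (j + 1) "")).foldl
          (fun dic v => dic.insert x (dic.getD x [] ++ [v])) d := by
  induction js generalizing d with
  | nil => rfl
  | cons j js ih =>
    simp only [List.foldl_cons, List.filter_cons]
    by_cases h : PySem.List.pyGetD list2 j "" = x
    · have h1 : (x == PySem.List.pyGetD list2 j "") = true := by simp [h]
      have h2 : (PySem.List.pyGetD list2 j "" == x) = true := by simp [h]
      rw [h1, h2]
      simp only []
      exact ih _
    · have h1 : (x == PySem.List.pyGetD list2 j "") = false := by
        simp; exact fun hh => h hh.symm
      have h2 : (PySem.List.pyGetD list2 j "" == x) = false := by simp [h]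
      rw [h1, h2]
      simp only [Bool.false_eq_true, if_false]
      exact ih _

-- A's list3 scan is the append-loop over count-many "nagetive"
lemma scanA3_eq (x : String) (ws : List String) (d : PySem.Dict String (List String)) :
    ws.foldl (fun dic w => if w == x then
        dic.insert x (dic.getD x [] ++ ["nagetive"]) else dic) d
      = (List.replicate (ws.count x) "nagetive").foldl
          (fun dic v => dic.insert x (dic.getD x [] ++ [v])) d := by
  induction ws generalizing d with
  | nil => rfl
  | cons w ws ih =>
    simp only [List.foldl_cons]
    by_cases h : w = x
    · subst h
      rw [List.count_cons_self, List.replicate_succ]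
      simp only [beq_self_eq_true]
      exact ih _
    · have h1 : (w == x) = false := by simp [h]
      rw [h1, List.count_cons_of_ne h]
      simp only [Bool.false_eq_true, if_false]
      exact ih _

-- the getD of B's m2 loop is the filtered value list of the stride-3 scan
lemma m2_getD (list2 : List String) (x : String) (js : List Int)
    (d : PySem.Dict String (List String)) :
    (js.foldl (fun d j => d.insert (PySem.List.pyGetD list2 j "")
        ((d.getD (PySem.List.pyGetD list2 j "") []) ++ [PySem.List.pyGetD list2 (j + 1) ""])) d).getD x []
      = d.getD x [] ++ (js.filter (fun j => PySem.List.pyGetD list2 j "" == x)).map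
          (fun j => PySem.List.pyGetD list2 (j + 1) "") := by
  induction js generalizing d with
  | nil => simp
  | cons j js ih =>
    rw [List.foldl_cons, ih, List.filter_cons]
    by_cases h : PySem.List.pyGetD list2 j "" = x
    · have h2 : (PySem.List.pyGetD list2 j "" == x) = true := by simp [h]
      rw [h2, if_pos rfl, h, PySem.Dict.getD_insert_self]
      simp
    · have h2 : (PySem.List.pyGetD list2 j "" == x) = false := by simp [h]
      rw [h2, PySem.Dict.getD_insert_of_ne _ _ _ (fun hh => h hh.symm)]
      simp

lemma pvC3_getD (list3 : List String) (x : String) :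
    (pvC3 list3).getD x 0 = (list3.count x : Int) := by
  unfold pvC3
  rw [PySem.Dict.getD_foldl_insert_add_one]
  simp

-- A's list3 index loop, converted to a fold over list3 (explicit init so the rewrite is first-order)
lemma scan3_pyRange (list3 : List String) (x : String) (d : PySem.Dict String (List String)) :
    (PySem.List.pyRange 0 (list3.length : Int) 1).foldl (fun dic m =>
        if PySem.List.pyGetD list3 m "" == x then
          dic.insert x (dic.getD x [] ++ ["nagetive"]) else dic) d
      = (List.replicate (list3.count x) "nagetive").foldl
          (fun dic v => dic.insert x (dic.getD x [] ++ [v])) d := by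
  rw [PySem.List.foldl_pyRange_zero_pyGetD' list3 ""
      (fun dic w => if w == x then dic.insert x (dic.getD x [] ++ ["nagetive"]) else dic) d]
  exact scanA3_eq x list3 d

-- A's per-element body equals B's per-element body
lemma step_eq (list2 list3 : List String) (d : PySem.Dict String (List String)) (x : String) :
    pvStepA list2 list3 d x = pvStepB (pvM2 list2) (pvC3 list3) d x := by
  unfold pvStepA pvStepB
  simp only []
  rw [scanA2_eq, scan3_pyRange, ← List.foldl_append, fold_insert_append]
  have hm2 : (pvM2 list2).getD x []
      = ((PySem.List.pyRange 0 ((list2.length : Int) - 1) 3).filter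
          (fun j => PySem.List.pyGetD list2 j "" == x)).map
          (fun j => PySem.List.pyGetD list2 (j + 1) "") := by
    unfold pvM2
    rw [m2_getD]
    simp
  rw [pvC3_getD, hm2]
  simp

-- ===== VERDICT (by name: the statement is the Claim_ definition above) =====
theorem recol_word_spec : Claim_equal_recol_word := by
  intro list1 list2 list3 _
  show recol_word list1 list2 list3 = recol_word_alt list1 list2 list3
  unfold recol_word recol_word_alt
  rw [PySem.List.foldl_pyRange_zero_pyGetD' list1 "" (pvStepA list2 list3)]
  have : pvStepA list2 list3 = pvStepB (pvM2 list2) (pvC3 list3) :=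
    funext fun d => funext fun x => step_eq list2 list3 d x
  rw [this]
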